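-- pv_equiv track=rewrite | github.com/sadlywo/2025.12.28LNN_Imputation | Change_pt_to_onnx.py | _infer_model_name
-- ===== SOURCE A (Python) =====
-- from typing import Dict, Optional
--
-- def _infer_model_name(state_dict: Dict) -> str:
--     keys = state_dict.keys()
--     if any(k.startswith("physics_coupling") for k in keys) or "gyro_noise_scale" in keys:
--         return "physics"
--     if "input_proj.weight" in keys or any(k.startswith("encoder.layers") for k in keys):
--         return "transformer"
--     if any(k.startswith("rnn.") for k in keys):
--         return "gru"
--     if any(k.startswith("cfc.") for k in keys):
--         return "cfc"
--     return "cfc"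
-- ===== SOURCE B (Python) =====
-- def _infer_model_name(state_dict) -> str:
--     # One pass over the keys, recording which architecture pattern was seen,
--     # then decide by priority: physics > transformer > gru > default "cfc".
--     phys = trans = gru = False
--     for k in state_dict.keys():
--         if k.startswith("physics_coupling") or k == "gyro_noise_scale":
--             phys = True
--         elif k == "input_proj.weight" or k.startswith("encoder.layers"):
--             trans = True
--         elif k.startswith("rnn."):
--             gru = True
--     if phys:
--         return "physics"
--     if trans:
--         return "transformer"
--     if gru:
--         return "gru"
--     return "cfc"
-- ===== Notes on version B (the rewrite author's own statement) =====
-- stated objective: idiomatic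
-- what changed: Replaces A's six separate any()/membership scans over the key view with a single pass that accumulates per-pattern boolean flags, followed by a priority decision (and drops A's redundant cfc scan whose both outcomes are 'cfc').
import Mathlib
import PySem

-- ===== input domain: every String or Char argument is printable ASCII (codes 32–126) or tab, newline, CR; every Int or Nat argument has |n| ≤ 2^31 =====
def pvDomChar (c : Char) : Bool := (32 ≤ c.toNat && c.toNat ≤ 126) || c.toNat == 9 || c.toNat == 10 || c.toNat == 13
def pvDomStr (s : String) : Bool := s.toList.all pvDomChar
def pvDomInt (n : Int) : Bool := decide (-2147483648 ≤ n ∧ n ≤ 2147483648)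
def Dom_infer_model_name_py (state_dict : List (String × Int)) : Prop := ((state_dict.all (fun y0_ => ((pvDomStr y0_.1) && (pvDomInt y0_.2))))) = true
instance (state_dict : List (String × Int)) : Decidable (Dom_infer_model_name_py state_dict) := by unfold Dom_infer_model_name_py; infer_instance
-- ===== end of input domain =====

-- B replaces A's repeated any()/membership scans with a single flag-accumulating pass plus a priority decision (idiomatic, same asymptotic cost).


-- ===== PORT A =====
def infer_model_name_py (state_dict : List (String × Int)) : String :=
  let keys := state_dict.map (·.1)
  if keys.any (fun k => PySem.Str.startswith k "physics_coupling") || keys.contains "gyro_noise_scale" then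
    "physics"
  else if keys.contains "input_proj.weight" || keys.any (fun k => PySem.Str.startswith k "encoder.layers") then
    "transformer"
  else if keys.any (fun k => PySem.Str.startswith k "rnn.") then
    "gru"
  else if keys.any (fun k => PySem.Str.startswith k "cfc.") then
    "cfc"
  else
    "cfc"

-- ===== PORT B =====
-- loop body of B's single pass: update the (phys, trans, gru) flags for one key
def pvStep (f : Bool × Bool × Bool) (kv : String × Int) : Bool × Bool × Bool :=
  if PySem.Str.startswith kv.1 "physics_coupling" || kv.1 == "gyro_noise_scale" then
    (true, f.2.1, f.2.2)
  else if kv.1 == "input_proj.weight" || PySem.Str.startswith kv.1 "encoder.layers" then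
    (f.1, true, f.2.2)
  else if PySem.Str.startswith kv.1 "rnn." then
    (f.1, f.2.1, true)
  else
    f

-- B's final priority decision on the accumulated flags
def pvVerdict (f : Bool × Bool × Bool) : String :=
  if f.1 then "physics"
  else if f.2.1 then "transformer"
  else if f.2.2 then "gru"
  else "cfc"

def infer_model_name_py_alt (state_dict : List (String × Int)) : String :=
  pvVerdict (state_dict.foldl pvStep (false, false, false))

-- ===== PRECONDITION & SPEC =====
def Spec_infer_model_name_py (state_dict : List (String × Int)) (out : String) : Prop := out = infer_model_name_py_alt state_dict
instance (state_dict : List (String × Int)) (out : String) : Decidable (Spec_infer_model_name_py state_dict out) := by unfold Spec_infer_model_name_py; infer_instance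

-- ===== CLAIM (what is proved, stated in full; the proofs are below) =====
def Claim_equal_infer_model_name_py : Prop := ∀ (state_dict : List (String × Int)), Dom_infer_model_name_py state_dict → Spec_infer_model_name_py state_dict (infer_model_name_py state_dict)

-- ===== LEMMAS AND PROOFS =====
def pvP (k : String) : Bool := PySem.Str.startswith k "physics_coupling" || k == "gyro_noise_scale"
def pvQ (k : String) : Bool := k == "input_proj.weight" || PySem.Str.startswith k "encoder.layers"
def pvR (k : String) : Bool := PySem.Str.startswith k "rnn."

lemma step_eq (f : Bool × Bool × Bool) (kv : String × Int) :
    pvStep f kv = (f.1 || pvP kv.1,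
                   f.2.1 || (!pvP kv.1 && pvQ kv.1),
                   f.2.2 || (!pvP kv.1 && (!pvQ kv.1 && pvR kv.1))) := by
  unfold pvStep pvP pvQ pvR
  cases h1 : (PySem.Str.startswith kv.1 "physics_coupling" || kv.1 == "gyro_noise_scale") with
  | true => simp
  | false =>
    cases h2 : (kv.1 == "input_proj.weight" || PySem.Str.startswith kv.1 "encoder.layers") with
    | true => simp
    | false =>
      cases h3 : PySem.Str.startswith kv.1 "rnn." with
      | true => simp
      | false => simp

lemma flags_spec (l : List (String × Int)) (f : Bool × Bool × Bool) :
    l.foldl pvStep f =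
      (f.1 || l.any (fun kv => pvP kv.1),
       f.2.1 || l.any (fun kv => !pvP kv.1 && pvQ kv.1),
       f.2.2 || l.any (fun kv => !pvP kv.1 && (!pvQ kv.1 && pvR kv.1))) := by
  induction l generalizing f with
  | nil => simp
  | cons hd tl ih =>
    rw [List.foldl_cons, ih, step_eq]
    simp only [List.any_cons, Bool.or_assoc]

lemma any_mask (l : List (String × Int)) (p q : String × Int → Bool)
    (h : l.any p = false) :
    l.any (fun kv => !p kv && q kv) = l.any q := by
  induction l with
  | nil => rfl
  | cons hd tl ih =>
    simp only [List.any_cons, Bool.or_eq_false_iff] at h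
    simp [h.1, ih h.2]

lemma strBeqComm (a b : String) : (a == b) = (b == a) := by
  cases h : b == a
  · simp only [beq_eq_false_iff_ne] at h ⊢
    exact fun e => h e.symm
  · simp only [beq_iff_eq] at h ⊢
    exact h.symm

lemma condA1 (l : List (String × Int)) :
    ((l.map (·.1)).any (fun k => PySem.Str.startswith k "physics_coupling")
      || (l.map (·.1)).contains "gyro_noise_scale") = l.any (fun kv => pvP kv.1) := by
  induction l with
  | nil => rfl
  | cons hd tl ih =>
    simp only [List.map_cons, List.any_cons, List.contains_cons, pvP] at *
    rw [← ih, strBeqComm "gyro_noise_scale" hd.1]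
    simp only [Bool.or_assoc, Bool.or_left_comm, Bool.or_comm]

lemma condA2 (l : List (String × Int)) :
    ((l.map (·.1)).contains "input_proj.weight"
      || (l.map (·.1)).any (fun k => PySem.Str.startswith k "encoder.layers")) = l.any (fun kv => pvQ kv.1) := by
  induction l with
  | nil => rfl
  | cons hd tl ih =>
    simp only [List.map_cons, List.any_cons, List.contains_cons, pvQ] at *
    rw [← ih, strBeqComm "input_proj.weight" hd.1]
    simp only [Bool.or_assoc, Bool.or_left_comm, Bool.or_comm]

lemma condA3 (l : List (String × Int)) :
    (l.map (·.1)).any (fun k => PySem.Str.startswith k "rnn.") = l.any (fun kv => pvR kv.1) := by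
  rw [List.any_map]
  rfl

-- ===== VERDICT (by name: the statement is the Claim_ definition above) =====
theorem infer_model_name_py_spec : Claim_equal_infer_model_name_py := by
  intro l _
  show infer_model_name_py l = infer_model_name_py_alt l
  unfold infer_model_name_py infer_model_name_py_alt
  rw [flags_spec]
  unfold pvVerdict
  simp only [Bool.false_or]
  rw [condA1, condA2, condA3]
  by_cases hp : (l.any fun kv => pvP kv.1) = true
  · rw [if_pos hp, if_pos hp]
  · have hp' := eq_false_of_ne_true hp
    rw [if_neg hp, if_neg hp,
        any_mask l (fun kv => pvP kv.1) (fun kv => pvQ kv.1) hp',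
        any_mask l (fun kv => pvP kv.1) (fun kv => !pvQ kv.1 && pvR kv.1) hp']
    by_cases hq : (l.any fun kv => pvQ kv.1) = true
    · rw [if_pos hq, if_pos hq]
    · have hq' := eq_false_of_ne_true hq
      rw [if_neg hq, if_neg hq,
          any_mask l (fun kv => pvQ kv.1) (fun kv => pvR kv.1) hq']
      by_cases hr : (l.any fun kv => pvR kv.1) = true
      · rw [if_pos hr, if_pos hr]
      · rw [if_neg hr, if_neg hr, ite_self]
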